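-- pv_equiv track=rewrite | github.com/pypi-data/pypi-mirror-380 | packages/aeroml/aeroml-1.0.0.tar.gz/aeroml-1.0.0/aero/experimentalist/nodes/analyze_data_nodes.py | _infer_domain_from_prompt
-- ===== SOURCE A (Python) =====
-- def _infer_domain_from_prompt(prompt_lower: str) -> dict:
--     """Infer research domain from user prompt keywords."""
--     domain_info = {
--         "primary_domain": "machine learning",
--         "task_type": "experimental",
--         "application_area": "",
--         "data_type": ""
--     }
--
--     # Computer Vision keywords
--     if any(kw in prompt_lower for kw in ["computer vision", "cv", "image", "video", "visual", "detection", "segmentation", "yolo", "cnn", "resnet"]):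
--         domain_info["primary_domain"] = "computer vision"
--         if "detection" in prompt_lower:
--             domain_info["task_type"] = "object detection"
--         elif "segmentation" in prompt_lower:
--             domain_info["task_type"] = "segmentation"
--         elif "classification" in prompt_lower and "image" in prompt_lower:
--             domain_info["task_type"] = "image classification"
--         domain_info["data_type"] = "images"
--
--     # NLP keywords
--     elif any(kw in prompt_lower for kw in ["nlp", "text", "language", "transformer", "bert", "gpt", "sentiment", "translation"]):
--         domain_info["primary_domain"] = "NLP"
--         if "classification" in prompt_lower:
--             domain_info["task_type"] = "text classification"
--         elif "generation" in prompt_lower: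
--             domain_info["task_type"] = "text generation"
--         elif "translation" in prompt_lower:
--             domain_info["task_type"] = "machine translation"
--         domain_info["data_type"] = "text"
--
--     # Robotics keywords
--     elif any(kw in prompt_lower for kw in ["robot", "autonomous", "control", "navigation", "manipulation"]):
--         domain_info["primary_domain"] = "robotics"
--         domain_info["task_type"] = "control"
--         domain_info["data_type"] = "sensor data"
--
--     # Time series keywords
--     elif any(kw in prompt_lower for kw in ["time series", "temporal", "forecasting", "lstm", "sequence"]):
--         domain_info["primary_domain"] = "time series analysis"
--         domain_info["task_type"] = "forecasting"
--         domain_info["data_type"] = "time series"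
--
--     # Application areas
--     if any(kw in prompt_lower for kw in ["medical", "healthcare", "clinical"]):
--         domain_info["application_area"] = "medical"
--     elif any(kw in prompt_lower for kw in ["autonomous", "driving", "vehicle"]):
--         domain_info["application_area"] = "autonomous driving"
--     elif any(kw in prompt_lower for kw in ["finance", "financial", "trading"]):
--         domain_info["application_area"] = "finance"
--
--     return domain_info
-- ===== SOURCE B (Python) =====
-- # One flat keyword->tag index scanned ONCE into a set of matched tags; every
-- # output field is then a single closed-form expression over boolean flags.
-- _KEYWORD_TAGS = [
--     ("computer vision", "CV"), ("cv", "CV"), ("image", "CV"), ("video", "CV"),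
--     ("visual", "CV"), ("detection", "CV"), ("segmentation", "CV"),
--     ("yolo", "CV"), ("cnn", "CV"), ("resnet", "CV"),
--     ("nlp", "NLP"), ("text", "NLP"), ("language", "NLP"),
--     ("transformer", "NLP"), ("bert", "NLP"), ("gpt", "NLP"),
--     ("sentiment", "NLP"), ("translation", "NLP"),
--     ("robot", "ROB"), ("autonomous", "ROB"), ("control", "ROB"),
--     ("navigation", "ROB"), ("manipulation", "ROB"),
--     ("time series", "TS"), ("temporal", "TS"), ("forecasting", "TS"),
--     ("lstm", "TS"), ("sequence", "TS"),
--     ("medical", "MED"), ("healthcare", "MED"), ("clinical", "MED"),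
--     ("autonomous", "DRV"), ("driving", "DRV"), ("vehicle", "DRV"),
--     ("finance", "FIN"), ("financial", "FIN"), ("trading", "FIN"),
--     ("detection", "det"), ("segmentation", "seg"), ("classification", "cls"),
--     ("image", "img"), ("generation", "gen"), ("translation", "trn"),
-- ]
--
--
-- def _infer_domain_from_prompt(prompt_lower: str) -> dict:
--     tags = {tag for kw, tag in _KEYWORD_TAGS if kw in prompt_lower}
--     cv = "CV" in tags
--     nl = "NLP" in tags and not cv
--     rb = "ROB" in tags and not cv and not nl
--     ts = "TS" in tags and not cv and not nl and not rb
--     primary = ("computer vision" if cv else "NLP" if nl else "robotics" if rb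
--                else "time series analysis" if ts else "machine learning")
--     data = ("images" if cv else "text" if nl else "sensor data" if rb
--             else "time series" if ts else "")
--     task = ("object detection" if cv and "det" in tags else
--             "segmentation" if cv and "seg" in tags else
--             "image classification" if cv and "cls" in tags and "img" in tags else
--             "text classification" if nl and "cls" in tags else
--             "text generation" if nl and "gen" in tags else
--             "machine translation" if nl and "trn" in tags else
--             "control" if rb else
--             "forecasting" if ts else "experimental")
--     app = ("medical" if "MED" in tags else
--            "autonomous driving" if "DRV" in tags else
--            "finance" if "FIN" in tags else "")
--     return {"primary_domain": primary, "task_type": task,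
--             "application_area": app, "data_type": data}
-- ===== Notes on version B (the rewrite author's own statement) =====
-- stated objective: alternative
-- what changed: Instead of A's nested if/elif cascade with per-branch substring tests, B scans one flat keyword-to-tag index once into a set of matched tags and then computes each of the four output fields as a single closed-form expression over boolean tag flags.
import Mathlib
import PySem

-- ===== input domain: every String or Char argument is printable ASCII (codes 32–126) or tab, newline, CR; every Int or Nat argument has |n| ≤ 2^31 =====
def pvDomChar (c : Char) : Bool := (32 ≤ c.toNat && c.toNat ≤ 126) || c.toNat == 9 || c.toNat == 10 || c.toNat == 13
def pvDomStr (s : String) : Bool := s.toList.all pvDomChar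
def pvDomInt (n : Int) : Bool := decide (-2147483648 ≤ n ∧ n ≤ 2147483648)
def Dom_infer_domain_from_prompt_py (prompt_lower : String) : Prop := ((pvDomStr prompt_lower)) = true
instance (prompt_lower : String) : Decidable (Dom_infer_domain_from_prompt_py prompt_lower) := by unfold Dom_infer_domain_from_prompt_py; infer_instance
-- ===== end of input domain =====

-- B replaces A's nested keyword cascade by ONE flat keyword→tag scan into a set of matched
-- tags, from which every output field is a single closed-form expression (simpler data flow).

-- ===== PORT A =====
-- literal transliteration: the dict's four fixed keys become four let-bound fields, updated in A's branch order
def infer_domain_from_prompt_py (prompt_lower : String) : List (String × String) :=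
  let primary_domain := "machine learning"
  let task_type := "experimental"
  let application_area := ""
  let data_type := ""
  let (primary_domain, task_type, data_type) :=
    if ["computer vision", "cv", "image", "video", "visual", "detection", "segmentation", "yolo", "cnn", "resnet"].any (fun kw => PySem.Str.isIn kw prompt_lower) then
      let primary_domain := "computer vision"
      let task_type :=
        if PySem.Str.isIn "detection" prompt_lower then "object detection"
        else if PySem.Str.isIn "segmentation" prompt_lower then "segmentation"
        else if PySem.Str.isIn "classification" prompt_lower && PySem.Str.isIn "image" prompt_lower then "image classification"
        else task_type
      (primary_domain, task_type, "images")
    else if ["nlp", "text", "language", "transformer", "bert", "gpt", "sentiment", "translation"].any (fun kw => PySem.Str.isIn kw prompt_lower) then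
      let primary_domain := "NLP"
      let task_type :=
        if PySem.Str.isIn "classification" prompt_lower then "text classification"
        else if PySem.Str.isIn "generation" prompt_lower then "text generation"
        else if PySem.Str.isIn "translation" prompt_lower then "machine translation"
        else task_type
      (primary_domain, task_type, "text")
    else if ["robot", "autonomous", "control", "navigation", "manipulation"].any (fun kw => PySem.Str.isIn kw prompt_lower) then
      ("robotics", "control", "sensor data")
    else if ["time series", "temporal", "forecasting", "lstm", "sequence"].any (fun kw => PySem.Str.isIn kw prompt_lower) then
      ("time series analysis", "forecasting", "time series")
    else (primary_domain, task_type, data_type)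
  let application_area :=
    if ["medical", "healthcare", "clinical"].any (fun kw => PySem.Str.isIn kw prompt_lower) then "medical"
    else if ["autonomous", "driving", "vehicle"].any (fun kw => PySem.Str.isIn kw prompt_lower) then "autonomous driving"
    else if ["finance", "financial", "trading"].any (fun kw => PySem.Str.isIn kw prompt_lower) then "finance"
    else application_area
  [("primary_domain", primary_domain), ("task_type", task_type),
   ("application_area", application_area), ("data_type", data_type)]

-- ===== PORT B =====
-- Source B's flat keyword → tag index (one entry per substring test A ever performs)
def pvKeywordTags : List (String × String) :=
  [("computer vision", "CV"), ("cv", "CV"), ("image", "CV"), ("video", "CV"),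
   ("visual", "CV"), ("detection", "CV"), ("segmentation", "CV"),
   ("yolo", "CV"), ("cnn", "CV"), ("resnet", "CV"),
   ("nlp", "NLP"), ("text", "NLP"), ("language", "NLP"),
   ("transformer", "NLP"), ("bert", "NLP"), ("gpt", "NLP"),
   ("sentiment", "NLP"), ("translation", "NLP"),
   ("robot", "ROB"), ("autonomous", "ROB"), ("control", "ROB"),
   ("navigation", "ROB"), ("manipulation", "ROB"),
   ("time series", "TS"), ("temporal", "TS"), ("forecasting", "TS"),
   ("lstm", "TS"), ("sequence", "TS"),
   ("medical", "MED"), ("healthcare", "MED"), ("clinical", "MED"),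
   ("autonomous", "DRV"), ("driving", "DRV"), ("vehicle", "DRV"),
   ("finance", "FIN"), ("financial", "FIN"), ("trading", "FIN"),
   ("detection", "det"), ("segmentation", "seg"), ("classification", "cls"),
   ("image", "img"), ("generation", "gen"), ("translation", "trn")]

-- the set comprehension {tag for kw, tag in _KEYWORD_TAGS if kw in prompt_lower}
def pvTags (prompt_lower : String) : PySem.Set String :=
  PySem.Set.ofList (pvKeywordTags.filterMap
    (fun r => if PySem.Str.isIn r.1 prompt_lower then some r.2 else none))

def infer_domain_from_prompt_py_alt (prompt_lower : String) : List (String × String) :=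
  let tags := pvTags prompt_lower
  let cv := PySem.Set.contains tags "CV"
  let nl := PySem.Set.contains tags "NLP" && !cv
  let rb := PySem.Set.contains tags "ROB" && !cv && !nl
  let ts := PySem.Set.contains tags "TS" && !cv && !nl && !rb
  let primary :=
    if cv then "computer vision" else if nl then "NLP" else if rb then "robotics"
    else if ts then "time series analysis" else "machine learning"
  let data :=
    if cv then "images" else if nl then "text" else if rb then "sensor data"
    else if ts then "time series" else ""
  let task :=
    if cv && PySem.Set.contains tags "det" then "object detection"
    else if cv && PySem.Set.contains tags "seg" then "segmentation"
    else if cv && PySem.Set.contains tags "cls" && PySem.Set.contains tags "img" then "image classification"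
    else if nl && PySem.Set.contains tags "cls" then "text classification"
    else if nl && PySem.Set.contains tags "gen" then "text generation"
    else if nl && PySem.Set.contains tags "trn" then "machine translation"
    else if rb then "control"
    else if ts then "forecasting"
    else "experimental"
  let app :=
    if PySem.Set.contains tags "MED" then "medical"
    else if PySem.Set.contains tags "DRV" then "autonomous driving"
    else if PySem.Set.contains tags "FIN" then "finance"
    else ""
  [("primary_domain", primary), ("task_type", task),
   ("application_area", app), ("data_type", data)]

-- ===== PRECONDITION & SPEC =====
def Spec_infer_domain_from_prompt_py (prompt_lower : String) (out : List (String × String)) : Prop := out = infer_domain_from_prompt_py_alt prompt_lower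
instance (prompt_lower : String) (out : List (String × String)) : Decidable (Spec_infer_domain_from_prompt_py prompt_lower out) := by unfold Spec_infer_domain_from_prompt_py; infer_instance

-- ===== CLAIM =====
def Claim_equal_infer_domain_from_prompt_py : Prop := ∀ (prompt_lower : String), Dom_infer_domain_from_prompt_py prompt_lower → Spec_infer_domain_from_prompt_py prompt_lower (infer_domain_from_prompt_py prompt_lower)

-- ===== LEMMAS AND PROOFS =====
-- each tag is in the matched-tag set iff one of its keywords occurs in the prompt
theorem pvHasCV (p : String) : PySem.Set.contains (pvTags p) "CV"
    = (PySem.Str.isIn "computer vision" p || (PySem.Str.isIn "cv" p || (PySem.Str.isIn "image" p || (PySem.Str.isIn "video" p || (PySem.Str.isIn "visual" p || (PySem.Str.isIn "detection" p || (PySem.Str.isIn "segmentation" p || (PySem.Str.isIn "yolo" p || (PySem.Str.isIn "cnn" p || PySem.Str.isIn "resnet" p))))))))) := by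
  rw [Bool.eq_iff_iff, PySem.Set.contains_iff, pvTags, PySem.Set.mem_ofList]
  simp [pvKeywordTags, List.mem_filterMap]

theorem pvHasNLP (p : String) : PySem.Set.contains (pvTags p) "NLP"
    = (PySem.Str.isIn "nlp" p || (PySem.Str.isIn "text" p || (PySem.Str.isIn "language" p || (PySem.Str.isIn "transformer" p || (PySem.Str.isIn "bert" p || (PySem.Str.isIn "gpt" p || (PySem.Str.isIn "sentiment" p || PySem.Str.isIn "translation" p))))))) := by
  rw [Bool.eq_iff_iff, PySem.Set.contains_iff, pvTags, PySem.Set.mem_ofList]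
  simp [pvKeywordTags, List.mem_filterMap]

theorem pvHasROB (p : String) : PySem.Set.contains (pvTags p) "ROB"
    = (PySem.Str.isIn "robot" p || (PySem.Str.isIn "autonomous" p || (PySem.Str.isIn "control" p || (PySem.Str.isIn "navigation" p || PySem.Str.isIn "manipulation" p)))) := by
  rw [Bool.eq_iff_iff, PySem.Set.contains_iff, pvTags, PySem.Set.mem_ofList]
  simp [pvKeywordTags, List.mem_filterMap]

theorem pvHasTS (p : String) : PySem.Set.contains (pvTags p) "TS"
    = (PySem.Str.isIn "time series" p || (PySem.Str.isIn "temporal" p || (PySem.Str.isIn "forecasting" p || (PySem.Str.isIn "lstm" p || PySem.Str.isIn "sequence" p)))) := by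
  rw [Bool.eq_iff_iff, PySem.Set.contains_iff, pvTags, PySem.Set.mem_ofList]
  simp [pvKeywordTags, List.mem_filterMap]

theorem pvHasMED (p : String) : PySem.Set.contains (pvTags p) "MED"
    = (PySem.Str.isIn "medical" p || (PySem.Str.isIn "healthcare" p || PySem.Str.isIn "clinical" p)) := by
  rw [Bool.eq_iff_iff, PySem.Set.contains_iff, pvTags, PySem.Set.mem_ofList]
  simp [pvKeywordTags, List.mem_filterMap]

theorem pvHasDRV (p : String) : PySem.Set.contains (pvTags p) "DRV"
    = (PySem.Str.isIn "autonomous" p || (PySem.Str.isIn "driving" p || PySem.Str.isIn "vehicle" p)) := by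
  rw [Bool.eq_iff_iff, PySem.Set.contains_iff, pvTags, PySem.Set.mem_ofList]
  simp [pvKeywordTags, List.mem_filterMap]

theorem pvHasFIN (p : String) : PySem.Set.contains (pvTags p) "FIN"
    = (PySem.Str.isIn "finance" p || (PySem.Str.isIn "financial" p || PySem.Str.isIn "trading" p)) := by
  rw [Bool.eq_iff_iff, PySem.Set.contains_iff, pvTags, PySem.Set.mem_ofList]
  simp [pvKeywordTags, List.mem_filterMap]

theorem pvHasDet (p : String) : PySem.Set.contains (pvTags p) "det" = PySem.Str.isIn "detection" p := by
  rw [Bool.eq_iff_iff, PySem.Set.contains_iff, pvTags, PySem.Set.mem_ofList]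
  simp [pvKeywordTags, List.mem_filterMap]

theorem pvHasSeg (p : String) : PySem.Set.contains (pvTags p) "seg" = PySem.Str.isIn "segmentation" p := by
  rw [Bool.eq_iff_iff, PySem.Set.contains_iff, pvTags, PySem.Set.mem_ofList]
  simp [pvKeywordTags, List.mem_filterMap]

theorem pvHasCls (p : String) : PySem.Set.contains (pvTags p) "cls" = PySem.Str.isIn "classification" p := by
  rw [Bool.eq_iff_iff, PySem.Set.contains_iff, pvTags, PySem.Set.mem_ofList]
  simp [pvKeywordTags, List.mem_filterMap]

theorem pvHasImg (p : String) : PySem.Set.contains (pvTags p) "img" = PySem.Str.isIn "image" p := by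
  rw [Bool.eq_iff_iff, PySem.Set.contains_iff, pvTags, PySem.Set.mem_ofList]
  simp [pvKeywordTags, List.mem_filterMap]

theorem pvHasGen (p : String) : PySem.Set.contains (pvTags p) "gen" = PySem.Str.isIn "generation" p := by
  rw [Bool.eq_iff_iff, PySem.Set.contains_iff, pvTags, PySem.Set.mem_ofList]
  simp [pvKeywordTags, List.mem_filterMap]

theorem pvHasTrn (p : String) : PySem.Set.contains (pvTags p) "trn" = PySem.Str.isIn "translation" p := by
  rw [Bool.eq_iff_iff, PySem.Set.contains_iff, pvTags, PySem.Set.mem_ofList]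
  simp [pvKeywordTags, List.mem_filterMap]

-- ===== VERDICT =====
set_option maxHeartbeats 2000000 in
theorem infer_domain_from_prompt_py_spec : Claim_equal_infer_domain_from_prompt_py := by
  intro p _
  unfold Spec_infer_domain_from_prompt_py infer_domain_from_prompt_py infer_domain_from_prompt_py_alt
  simp only [List.any_cons, List.any_nil, Bool.or_false]
  rw [← pvHasCV p, ← pvHasNLP p, ← pvHasROB p, ← pvHasTS p, ← pvHasMED p, ← pvHasDRV p,
      ← pvHasFIN p, ← pvHasDet p, ← pvHasSeg p, ← pvHasCls p, ← pvHasImg p, ← pvHasGen p,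
      ← pvHasTrn p]
  generalize PySem.Set.contains (pvTags p) "CV" = b1
  generalize PySem.Set.contains (pvTags p) "NLP" = b2
  generalize PySem.Set.contains (pvTags p) "ROB" = b3
  generalize PySem.Set.contains (pvTags p) "TS" = b4
  generalize PySem.Set.contains (pvTags p) "MED" = b5
  generalize PySem.Set.contains (pvTags p) "DRV" = b6
  generalize PySem.Set.contains (pvTags p) "FIN" = b7
  generalize PySem.Set.contains (pvTags p) "det" = b8
  generalize PySem.Set.contains (pvTags p) "seg" = b9
  generalize PySem.Set.contains (pvTags p) "cls" = b10
  generalize PySem.Set.contains (pvTags p) "img" = b11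
  generalize PySem.Set.contains (pvTags p) "gen" = b12
  generalize PySem.Set.contains (pvTags p) "trn" = b13
  revert b1 b2 b3 b4 b5 b6 b7 b8 b9 b10 b11 b12 b13
  decide
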